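-- pv_equiv track=rewrite | github.com/etienneCharignon/adventOfCode | 2021/j3.py | counters
-- ===== SOURCE A (Python) =====
-- def counters(diag):
--     counters = []
--     for i in range(len(diag[0])):
--         counters.append([0, 0])
--
--     for binary in diag:
--         for j, bit in enumerate(binary):
--             if(bit == "0"):
--                 counters[j][0] += 1
--             else:
--                 counters[j][1] += 1
--     return counters
-- ===== SOURCE B (Python) =====
-- def counters(diag):
--     columns = [[] for _ in range(len(diag[0]))]
--     for binary in diag:
--         for j, bit in enumerate(binary):
--             columns[j].append(bit)
--     return [[col.count("0"), len(col) - col.count("0")] for col in columns]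
-- ===== Notes on version B (the rewrite author's own statement) =====
-- stated objective: alternative
-- what changed: B first materialises the transposed bit columns and then derives each pair by counting zeros in the column and subtracting from the column length, instead of A's in-place twin-increment [zeros,ones] counters updated while scanning.
import Mathlib
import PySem

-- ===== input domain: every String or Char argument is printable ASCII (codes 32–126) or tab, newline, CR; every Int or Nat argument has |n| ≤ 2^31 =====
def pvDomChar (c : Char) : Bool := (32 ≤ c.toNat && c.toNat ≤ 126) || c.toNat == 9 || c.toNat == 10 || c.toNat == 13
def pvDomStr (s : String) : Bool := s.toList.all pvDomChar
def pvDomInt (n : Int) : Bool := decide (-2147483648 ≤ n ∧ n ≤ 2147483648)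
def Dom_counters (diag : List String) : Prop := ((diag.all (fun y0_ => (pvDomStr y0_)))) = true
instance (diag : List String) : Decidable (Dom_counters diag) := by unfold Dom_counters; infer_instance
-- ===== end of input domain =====

-- B materialises the transposed bit columns and derives each pair by counting zeros and subtracting from the column length, instead of A's in-place twin-increment counters; alternative decomposition, same cost.


-- ===== PORT A =====
-- one enumerate step of A's inner loop: counters[j][0] += 1 / counters[j][1] += 1
def pvStepA (cs : List (List Int)) (jb : Int × Char) : List (List Int) :=
  if jb.2 = '0' then cs.modify jb.1.toNat (fun r => r.modify 0 (· + 1))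
  else cs.modify jb.1.toNat (fun r => r.modify 1 (· + 1))

-- A's body for one row: for j, bit in enumerate(binary)
def pvRowA (cs : List (List Int)) (binary : String) : List (List Int) :=
  (PySem.List.enumerate binary.toList 0).foldl pvStepA cs

def counters (diag : List String) : List (List Int) :=
  match PySem.List.pyGet? diag 0 with
  | none => []   -- diag[0] raises IndexError in Python; excluded by Pre_counters
  | some first =>
    let init := (PySem.List.pyRange 0 (PySem.Str.len first) 1).foldl
      (fun acc _ => acc ++ [([0, 0] : List Int)]) []
    diag.foldl pvRowA init

-- ===== PORT B =====
-- one enumerate step of B's transpose loop: columns[j].append(bit)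
def pvStepB (cols : List (List Char)) (jb : Int × Char) : List (List Char) :=
  cols.modify jb.1.toNat (fun col => col ++ [jb.2])

-- B's transpose body for one row: for j, bit in enumerate(binary)
def pvRowB (cols : List (List Char)) (binary : String) : List (List Char) :=
  (PySem.List.enumerate binary.toList 0).foldl pvStepB cols

def counters_alt (diag : List String) : List (List Int) :=
  match PySem.List.pyGet? diag 0 with
  | none => []   -- diag[0] raises IndexError in Python; excluded by Pre_counters
  | some first =>
    let columns := diag.foldl pvRowB
      ((PySem.List.pyRange 0 (PySem.Str.len first) 1).map (fun _ => ([] : List Char)))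
    columns.map (fun col =>
      [(PySem.List.count col '0' : Int), (col.length : Int) - (PySem.List.count col '0' : Int)])

-- ===== PRECONDITION & SPEC =====
-- Pre_ excludes exactly the inputs where Python A raises IndexError: the empty list (diag[0])
-- and lists with a row longer than the first row (counters[j] out of range).
def Pre_counters (diag : List String) : Prop :=
  diag ≠ [] ∧ ∀ b ∈ diag, b.toList.length ≤ ((diag.headD "").toList.length)
instance (diag : List String) : Decidable (Pre_counters diag) := by unfold Pre_counters; infer_instance

def pvWitness_counters : List String := ["010", "110", "001"]

def Spec_counters (diag : List String) (out : List (List Int)) : Prop := out = counters_alt diag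
instance (diag : List String) (out : List (List Int)) : Decidable (Spec_counters diag out) := by unfold Spec_counters; infer_instance

-- ===== CLAIM (what is proved, stated in full; the proofs are below) =====
def Claim_equal_counters : Prop := ∀ (diag : List String), Dom_counters diag → Pre_counters diag → Spec_counters diag (counters diag)

-- ===== LEMMAS AND PROOFS =====

-- generic shape of both inner loops: modify the j-th cell with a per-character update
def pvUpd {α : Type} (f : Char → α → α) (cs : List α) (jb : Int × Char) : List α :=
  cs.modify jb.1.toNat (f jb.2)

-- the effect of one row's characters on the j-th cell
def pvApplyF {α : Type} (f : Char → α → α) (b : List Char) (j : Nat) (r : α) : α :=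
  match b[j]? with
  | some c => f c r
  | none => r

-- A's per-character cell update
def pvBumpA (c : Char) (r : List Int) : List Int :=
  if c = '0' then r.modify 0 (· + 1) else r.modify 1 (· + 1)

lemma pvStepA_eq : pvStepA = pvUpd pvBumpA := by
  funext cs jb
  by_cases hc : jb.2 = '0'
  · simp only [pvStepA, pvUpd, hc, reduceIte]
    congr 1
  · simp only [pvStepA, pvUpd, if_neg hc]
    congr 1
    funext r
    simp [pvBumpA, hc]

lemma pvStepB_eq : pvStepB = pvUpd (fun c col => col ++ [c]) := rfl

lemma pvApplyF_cons {α : Type} (f : Char → α → α) (c : Char) (l : List Char) (n : Nat) :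
    pvApplyF f (c :: l) (n + 1) = pvApplyF f l n := by
  funext r; simp [pvApplyF]

lemma inner_get?_lt {α : Type} (f : Char → α → α) (chars : List Char) (s : Nat)
    (cs : List α) (j : Nat) (hjs : j < s) :
    ((PySem.List.enumerate chars (s : Int)).foldl (pvUpd f) cs)[j]? = cs[j]? := by
  induction chars generalizing s cs with
  | nil => simp [PySem.List.enumerate]
  | cons c l ih =>
    rw [PySem.List.enumerate_cons, List.foldl_cons]
    have : ((s : Int) + 1) = ((s + 1 : Nat) : Int) := by push_cast; ring
    rw [this, ih (s + 1) _ (by omega)]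
    have hne : ¬ s = j := by omega
    simp [pvUpd, hne]

lemma inner_get?_ge {α : Type} (f : Char → α → α) (chars : List Char) (s : Nat)
    (cs : List α) (j : Nat) (hsj : s ≤ j) :
    ((PySem.List.enumerate chars (s : Int)).foldl (pvUpd f) cs)[j]? =
      (cs[j]?).map (pvApplyF f chars (j - s)) := by
  induction chars generalizing s cs with
  | nil =>
    simp [PySem.List.enumerate]
    cases cs[j]? <;> simp [pvApplyF]
  | cons c l ih =>
    rw [PySem.List.enumerate_cons, List.foldl_cons]
    have hcast : ((s : Int) + 1) = ((s + 1 : Nat) : Int) := by push_cast; ring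
    by_cases hj : j = s
    · subst hj
      rw [hcast, inner_get?_lt f l (j + 1) _ j (by omega)]
      simp [pvUpd]
      cases cs[j]? <;> simp [pvApplyF]
    · have hlt : s + 1 ≤ j := by omega
      rw [hcast, ih (s + 1) _ hlt]
      have hsub : j - s = (j - (s + 1)) + 1 := by omega
      rw [hsub, pvApplyF_cons]
      have hne : ¬ s = j := by omega
      simp [pvUpd, hne]

lemma outer_get? {α : Type} (f : Char → α → α) (rs : List String) (cs : List α) (j : Nat) :
    (rs.foldl (fun cs b => (PySem.List.enumerate b.toList 0).foldl (pvUpd f) cs) cs)[j]? =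
      (cs[j]?).map (fun r => rs.foldl (fun r b => pvApplyF f b.toList j r) r) := by
  induction rs generalizing cs with
  | nil => rcases h : cs[j]? with _ | r <;> simp [h]
  | cons b rs ih =>
    rw [List.foldl_cons, ih]
    have h0 : ((PySem.List.enumerate b.toList 0).foldl (pvUpd f) cs)[j]? =
        (cs[j]?).map (pvApplyF f b.toList j) := by
      have := inner_get?_ge f b.toList 0 cs j (Nat.zero_le j)
      simpa using this
    rw [h0]
    cases cs[j]? <;> simp

-- A's fold over all rows, started at [z, o], counts zeros and non-zeros at column j
lemma fold_applyA (rs : List String) (j : Nat) (z o : Int) :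
    rs.foldl (fun r b => pvApplyF pvBumpA b.toList j r) [z, o] =
      [z + (rs.countP (fun b => b.toList[j]? == some '0') : Int),
       o + (rs.countP (fun b => (b.toList[j]?).any (fun c => c != '0')) : Int)] := by
  induction rs generalizing z o with
  | nil => simp
  | cons b rs ih =>
    rw [List.foldl_cons]
    rcases h : b.toList[j]? with _ | c
    · rw [show pvApplyF pvBumpA b.toList j [z, o] = [z, o] by simp [pvApplyF, h]]
      rw [ih]; simp [h]
    · by_cases hc : c = '0'
      · rw [show pvApplyF pvBumpA b.toList j [z, o] = [z + 1, o] by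
          simp [pvApplyF, pvBumpA, h, hc, List.modify]]
        rw [ih]; simp [h, hc]
        omega
      · rw [show pvApplyF pvBumpA b.toList j [z, o] = [z, o + 1] by
          simp [pvApplyF, pvBumpA, h, hc, List.modify]]
        rw [ih]; simp [h, hc]
        omega

-- B's fold over all rows appends, building the j-th column: the characters rows have at position j
lemma fold_applyB (rs : List String) (j : Nat) (acc : List Char) :
    rs.foldl (fun r b => pvApplyF (fun c col => col ++ [c]) b.toList j r) acc =
      acc ++ rs.filterMap (fun b => b.toList[j]?) := by
  induction rs generalizing acc with
  | nil => simp
  | cons b rs ih =>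
    rw [List.foldl_cons]
    rcases h : b.toList[j]? with _ | c
    · rw [show pvApplyF (fun c col => col ++ [c]) b.toList j acc = acc by simp [pvApplyF, h]]
      rw [ih]; simp [h]
    · rw [show pvApplyF (fun c col => col ++ [c]) b.toList j acc = acc ++ [c] by
        simp [pvApplyF, h]]
      rw [ih]; simp [h]


lemma count_col (rs : List String) (j : Nat) :
    (rs.filterMap (fun b => b.toList[j]?)).count '0'
      = rs.countP (fun b => b.toList[j]? == some '0') := by
  rw [List.count_filterMap]

lemma len_col (rs : List String) (j : Nat) :
    (rs.filterMap (fun b => b.toList[j]?)).length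
      = rs.countP (fun b => decide (j < b.toList.length)) := by
  induction rs with
  | nil => simp
  | cons b rs ih =>
    rcases h : b.toList[j]? with _ | c
    · have hge : ¬ j < b.toList.length := by
        simpa [List.getElem?_eq_none_iff] using h
      have hge2 : ¬ j < b.length := by simpa using hge
      simp [hge2, ih]
    · have hlt : j < b.toList.length := (List.getElem?_eq_some_iff.mp h).1
      have hlt2 : j < b.length := by simpa using hlt
      simp [hlt2, ih]

lemma count_split (rs : List String) (j : Nat) :
    rs.countP (fun b => b.toList[j]? == some '0')
      + rs.countP (fun b => (b.toList[j]?).any (fun c => c != '0'))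
      = rs.countP (fun b => decide (j < b.toList.length)) := by
  induction rs with
  | nil => simp
  | cons b rs ih =>
    rcases h : b.toList[j]? with _ | c
    · have hge : ¬ j < b.toList.length := by
        simpa [List.getElem?_eq_none_iff] using h
      have hge2 : ¬ j < b.length := by simpa using hge
      simp [hge2] at ih ⊢
      omega
    · have hlt : j < b.toList.length := (List.getElem?_eq_some_iff.mp h).1
      have hlt2 : j < b.length := by simpa using hlt
      have hgetc : b.toList[j]'hlt = c := (List.getElem?_eq_some_iff.mp h).2
      by_cases hc : c = '0' <;>
      · simp [hgetc, hlt2, hc] at ih ⊢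
        omega

lemma a_eq_fold_map (diag : List String) (first : String)
    (h : PySem.List.pyGet? diag 0 = some first) :
    counters diag = diag.foldl
      (fun cs b => (PySem.List.enumerate b.toList 0).foldl (pvUpd pvBumpA) cs)
      ((PySem.List.pyRange 0 (PySem.Str.len first) 1).map (fun _ => ([0, 0] : List Int))) := by
  simp only [counters, h]
  rw [PySem.List.foldl_append_singleton_eq_map (fun _ => ([0, 0] : List Int)) _ []]
  have hrow : pvRowA = fun cs b => (PySem.List.enumerate b.toList 0).foldl (pvUpd pvBumpA) cs := by
    funext cs b
    rw [pvRowA, pvStepA_eq]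
  rw [hrow]
  simp

lemma b_eq_fold_map (diag : List String) (first : String)
    (h : PySem.List.pyGet? diag 0 = some first) :
    counters_alt diag = (diag.foldl
      (fun cs b => (PySem.List.enumerate b.toList 0).foldl (pvUpd (fun c col => col ++ [c])) cs)
      ((PySem.List.pyRange 0 (PySem.Str.len first) 1).map (fun _ => ([] : List Char)))).map
        (fun col => [(PySem.List.count col '0' : Int),
                     (col.length : Int) - (PySem.List.count col '0' : Int)]) := by
  simp only [counters_alt, h]
  have hrow : pvRowB = fun cs b => (PySem.List.enumerate b.toList 0).foldl (pvUpd (fun c col => col ++ [c])) cs := by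
    funext cs b
    rw [pvRowB, pvStepB_eq]
  rw [hrow]

lemma head_pyGet? (diag : List String) (hne : diag ≠ []) :
    PySem.List.pyGet? diag 0 = some (diag.headD "") := by
  cases diag with
  | nil => exact absurd rfl hne
  | cons a l => simp [PySem.List.pyGet?, PySem.List.pyIdx?]

-- ===== VERDICT (by name: the statement is the Claim_ definition above) =====
theorem counters_spec : Claim_equal_counters := by
  intro diag _ hpre
  obtain ⟨hne, _⟩ := hpre
  unfold Spec_counters
  set first := diag.headD "" with hf
  have hget := head_pyGet? diag hne
  rw [a_eq_fold_map diag first hget, b_eq_fold_map diag first hget]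
  apply List.ext_getElem?
  intro j
  rw [outer_get?]
  conv_rhs => rw [List.getElem?_map]
  rw [outer_get?]
  simp only [List.getElem?_map]
  rcases lt_or_ge j ((PySem.List.pyRange 0 (PySem.Str.len first) 1).length) with hj | hj
  · simp only [List.getElem?_eq_getElem hj, Option.map_some]
    rw [fold_applyA, fold_applyB]
    have hsplit := count_split diag j
    simp only [List.nil_append, PySem.List.count_eq, count_col, len_col, Option.some_inj,
      List.cons.injEq, and_true]
    constructor <;> omega
  · simp only [List.getElem?_eq_none hj, Option.map_none]
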